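-- pv_equiv track=rewrite | github.com/danyguancha/aprendizaje_por_refuerzo | helper_algoritmos/helper.py | convertir_a_politica
-- ===== SOURCE A (Python) =====
-- def convertir_a_politica(Q_table):
--     """
--     Convierte una tabla Q en una política binaria (0 y 1).
--
--     Parameters:
--         Q_table (dict): Tabla Q con estados como claves y un diccionario con valores Q.
--
--     Returns:
--         dict: Política derivada de la tabla Q.
--     """
--     politica = {}
--     for estado, data in Q_table.items():
--         valores = data["values"]  # Extraemos los valores Q del estado
--
--         # Verificar si todos los valores son iguales
--         if len(set(valores)) == 1:  # Todos los valores Q son iguales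
--             # Asignar 0 a todas las acciones (sin preferencia)
--             politica[estado] = [0] * len(valores)
--         else:
--             # Obtener el índice del valor máximo
--             max_valor = max(valores)
--             indice_max = valores.index(max_valor)
--
--             # Crear una lista de ceros del mismo tamaño que los valores
--             politica_estado = [0] * len(valores)
--             # Colocar un 1 en la posición de la acción óptima
--             politica_estado[indice_max] = 1
--
--             # Guardar la política para este estado
--             politica[estado] = politica_estado
--
--     return politica
-- ===== SOURCE B (Python) =====
-- def convertir_a_politica(Q_table):
--     """Sort-then-pick: per state, sort (-value, index) pairs; the first pair names the
--     greedy action (first occurrence of the max), and comparing first vs last pair's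
--     value detects the all-equal case."""
--     politica = {}
--     for estado, data in Q_table.items():
--         valores = data["values"]
--         pares = sorted((-v, i) for i, v in enumerate(valores))
--         fila = [0] * len(valores)
--         if pares[0][0] != pares[-1][0]:
--             fila[pares[0][1]] = 1
--         politica[estado] = fila
--     return politica
-- ===== Notes on version B (the rewrite author's own statement) =====
-- stated objective: alternative
-- what changed: Per state, A's three scans (set to test all-equal, max(), list.index()) are replaced by a sort-then-pick algorithm: sort the (-value, index) pairs once; the first pair gives the first-occurrence argmax and comparing the first and last pairs' values detects the all-equal case.
import Mathlib
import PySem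

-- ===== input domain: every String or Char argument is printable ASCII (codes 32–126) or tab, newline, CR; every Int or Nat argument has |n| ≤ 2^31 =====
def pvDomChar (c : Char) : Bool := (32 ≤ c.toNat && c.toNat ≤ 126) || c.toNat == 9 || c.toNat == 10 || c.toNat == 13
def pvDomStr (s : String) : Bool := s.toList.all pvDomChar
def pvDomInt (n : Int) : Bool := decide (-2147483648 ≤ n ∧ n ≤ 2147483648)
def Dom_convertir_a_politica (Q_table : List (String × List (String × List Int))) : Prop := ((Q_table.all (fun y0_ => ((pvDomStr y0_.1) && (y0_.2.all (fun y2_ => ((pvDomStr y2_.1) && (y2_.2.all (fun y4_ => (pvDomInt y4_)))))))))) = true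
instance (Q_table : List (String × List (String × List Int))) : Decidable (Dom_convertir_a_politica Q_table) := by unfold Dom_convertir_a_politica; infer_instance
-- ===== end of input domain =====

-- B replaces A's three scans per state (set of values, max, index) by a sort-then-pick
-- algorithm on the (-value, index) pairs (objective: alternative; not claimed faster).

-- ===== PORT A =====
def convertir_a_politica (Q_table : List (String × List (String × List Int))) : List (String × List Int) :=
  (Q_table.foldl (fun (politica : PySem.Dict String (List Int)) p =>
    let valores := (PySem.Dict.get? (PySem.Dict.mk p.2) "values").getD []
    if PySem.Set.len (PySem.Set.ofList valores) == 1 then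
      politica.insert p.1 (List.replicate valores.length 0)
    else
      let max_valor := (PySem.List.max? valores (fun x => x)).getD 0
      let indice_max := (PySem.List.index? valores max_valor).getD 0
      let politica_estado := List.replicate valores.length 0
      let politica_estado := politica_estado.set indice_max 1
      politica.insert p.1 politica_estado) PySem.Dict.empty).items

-- ===== PORT B =====
def convertir_a_politica_alt (Q_table : List (String × List (String × List Int))) : List (String × List Int) :=
  (Q_table.foldl (fun (politica : PySem.Dict String (List Int)) p =>
    let valores := (PySem.Dict.get? (PySem.Dict.mk p.2) "values").getD []
    -- sorted((-v, i) for i, v in enumerate(valores)): tuples compare lexicographically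
    let pares := PySem.List.sorted2 ((PySem.List.enumerate valores 0).map (fun q => (-q.2, q.1))) Prod.fst Prod.snd
    let fila := List.replicate valores.length 0
    let fila := if (PySem.List.pyGetD pares 0 (0, 0)).1 != (PySem.List.pyGetD pares (-1) (0, 0)).1
      then PySem.List.pySetD fila (PySem.List.pyGetD pares 0 (0, 0)).2 1 else fila
    politica.insert p.1 fila) PySem.Dict.empty).items

-- ===== PRECONDITION & SPEC =====
-- Pre_ excludes tables where some state's data dict has no "values" key or an empty
-- "values" list (A raises KeyError / ValueError there, B IndexError), and tables whose
-- outer dict or some inner data dict has duplicate keys, where the assoc-list encoding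
-- of a Python dict is ambiguous (Python collapses duplicates on construction).
def Pre_convertir_a_politica (Q_table : List (String × List (String × List Int))) : Prop :=
  (Q_table.map Prod.fst).Nodup ∧
  ∀ p ∈ Q_table, (p.2.map Prod.fst).Nodup ∧
    (PySem.Dict.get? (PySem.Dict.mk p.2) "values").getD [] ≠ []
instance (Q_table : List (String × List (String × List Int))) : Decidable (Pre_convertir_a_politica Q_table) := by unfold Pre_convertir_a_politica; infer_instance
def pvWitness_convertir_a_politica : (List (String × List (String × List Int))) :=
  [("s0", [("values", [1, 2])]), ("s1", [("values", [3, 3])])]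
def Spec_convertir_a_politica (Q_table : List (String × List (String × List Int))) (out : List (String × List Int)) : Prop := out = convertir_a_politica_alt Q_table
instance (Q_table : List (String × List (String × List Int))) (out : List (String × List Int)) : Decidable (Spec_convertir_a_politica Q_table out) := by unfold Spec_convertir_a_politica; infer_instance

-- ===== CLAIM (what is proved, stated in full; the proofs are below) =====
def Claim_equal_convertir_a_politica : Prop := ∀ (Q_table : List (String × List (String × List Int))), Dom_convertir_a_politica Q_table → Pre_convertir_a_politica Q_table → Spec_convertir_a_politica Q_table (convertir_a_politica Q_table)

-- ===== LEMMAS AND PROOFS =====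

-- Python's tuple comparison on the pairs is the lexicographic order: sorted2 with
-- component keys is sorted with the (injective) key toLex.
theorem pvSorted2_eq (xs : List (Int × Int)) :
    PySem.List.sorted2 xs Prod.fst Prod.snd = PySem.List.sorted xs (fun q => toLex q) := by
  show List.foldl (fun acc x => PySem.List.insertBy _ x acc) [] xs =
       List.foldl (fun acc x => PySem.List.insertBy _ x acc) [] xs
  have hbefore : (fun (a b : Int × Int) => decide (a.1 < b.1) || (!decide (b.1 < a.1) && decide (a.2 < b.2))) =
      (fun (a b : Int × Int) => decide ((toLex a : Lex (Int × Int)) < toLex b)) := by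
    funext a b
    have h : ((toLex a : Lex (Int × Int)) < toLex b) ↔ a.1 < b.1 ∨ a.1 = b.1 ∧ a.2 < b.2 :=
      Prod.Lex.lt_iff
    by_cases h1 : a.1 < b.1 <;> by_cases h2 : b.1 < a.1 <;> by_cases h3 : a.2 < b.2 <;>
      simp [h, h1, h2, h3] <;> omega
  rw [hbefore]

-- the last element of a key-sorted list is key-maximal among its members
theorem pvGetLast_isMax {α κ : Type} [LinearOrder κ] (xs : List α) (key : α → κ)
    (hne : PySem.List.sorted xs key ≠ []) :
    ∀ y ∈ PySem.List.sorted xs key, key y ≤ key ((PySem.List.sorted xs key).getLast hne) := by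
  intro y hy
  have hpw : List.Pairwise (fun a b => key b ≤ key a) (PySem.List.sorted xs key).reverse := by
    rw [List.pairwise_reverse]
    exact PySem.List.sorted_pairwise xs key
  rcases hrev : (PySem.List.sorted xs key).reverse with _ | ⟨l, t⟩
  · exact absurd (by simpa using congrArg List.reverse hrev) hne
  have hl : (PySem.List.sorted xs key).getLast hne = l := by
    have := List.head?_reverse (l := PySem.List.sorted xs key)
    rw [hrev] at this
    rw [List.getLast_eq_iff_getLast?_eq_some]
    exact this.symm
  rw [hl]
  rw [hrev] at hpw
  have hy' : y ∈ l :: t := by rw [← hrev]; simpa using hy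
  rcases List.mem_cons.mp hy' with h | h
  · exact le_of_eq (congrArg key h)
  · exact List.rel_of_pairwise_cons hpw h

-- membership in the pair list B sorts
theorem pvMemPairs (valores : List Int) (p : Int × Int) :
    p ∈ (PySem.List.enumerate valores 0).map (fun q => (-q.2, q.1)) ↔
      ∃ (k : Nat) (hk : k < valores.length), p = (-valores[k], (k : Int)) := by
  constructor
  · intro hp
    rcases List.mem_map.mp hp with ⟨q, hq, hpq⟩
    rcases (PySem.List.mem_enumerate_iff valores 0 q).mp hq with ⟨k, hk, hqk⟩
    exact ⟨k, hk, by rw [← hpq, hqk]; simp⟩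
  · rintro ⟨k, hk, rfl⟩
    exact List.mem_map.mpr ⟨((k : Int), valores[k]),
      (PySem.List.mem_enumerate_iff valores 0 _).mpr ⟨k, hk, by simp⟩, rfl⟩

theorem pvSetAdd_length_le : ∀ (t : List Int) (s : PySem.Set Int),
    s.length ≤ (t.foldl PySem.Set.add s).length := by
  intro t
  induction t with
  | nil => intro s; simp
  | cons v t ih =>
    intro s
    refine le_trans ?_ (ih (PySem.Set.add s v))
    simp only [PySem.Set.add]
    split
    · exact le_refl _
    · simp

-- len(set(v0 :: rest)) == 1 iff every element of rest equals v0
theorem pvSetLenAux (v0 : Int) : ∀ (rest : List Int),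
    (PySem.Set.len (rest.foldl PySem.Set.add [v0]) == 1) = rest.all (· == v0) := by
  intro rest
  induction rest with
  | nil => rfl
  | cons r rest ih =>
    by_cases h : r = v0
    · subst h
      have hadd : PySem.Set.add [r] r = [r] := by simp [PySem.Set.add, PySem.Set.contains]
      simp only [List.foldl_cons, hadd, List.all_cons, ih]
      simp
    · have hadd : PySem.Set.add [v0] r = [v0, r] := by
        simp [PySem.Set.add, PySem.Set.contains, h]
      have hge : 2 ≤ (List.foldl PySem.Set.add [v0, r] rest).length := pvSetAdd_length_le rest [v0, r]
      simp only [List.foldl_cons, hadd, List.all_cons]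
      have hfalse : (PySem.Set.len (List.foldl PySem.Set.add [v0, r] rest) == 1) = false := by
        simp only [PySem.Set.len]
        simp
        omega
      rw [hfalse]
      simp [h]

theorem pvSetLen (v0 : Int) (rest : List Int) :
    (PySem.Set.len (PySem.Set.ofList (v0 :: rest)) == 1) = rest.all (· == v0) := by
  rw [PySem.Set.ofList_eq_foldl, show List.foldl PySem.Set.add [] (v0 :: rest) =
    List.foldl PySem.Set.add [v0] rest from rfl, pvSetLenAux]

-- all-equal is equivalent to: every element equals some fixed member value
theorem pvAllEq (v0 : Int) (rest : List Int) (c : Int)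
    (h : ∀ y ∈ v0 :: rest, y = c) : rest.all (· == v0) = true := by
  have hv0 : v0 = c := h v0 (by simp)
  simp only [List.all_eq_true]
  intro r hr
  simp [h r (by simp [hr]), hv0]

-- the two per-state rows agree on any nonempty value list
theorem pvRow (estado : String) (valores : List Int) (hne : valores ≠ [])
    (politica : PySem.Dict String (List Int)) :
    (if PySem.Set.len (PySem.Set.ofList valores) == 1 then
      politica.insert estado (List.replicate valores.length 0)
    else
      let max_valor := (PySem.List.max? valores (fun x => x)).getD 0
      let indice_max := (PySem.List.index? valores max_valor).getD 0
      let politica_estado := List.replicate valores.length 0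
      let politica_estado := politica_estado.set indice_max 1
      politica.insert estado politica_estado) =
    (let pares := PySem.List.sorted2 ((PySem.List.enumerate valores 0).map (fun q => (-q.2, q.1))) Prod.fst Prod.snd
     let fila := List.replicate valores.length 0
     let fila := if (PySem.List.pyGetD pares 0 (0, 0)).1 != (PySem.List.pyGetD pares (-1) (0, 0)).1
       then PySem.List.pySetD fila (PySem.List.pyGetD pares 0 (0, 0)).2 1 else fila
     politica.insert estado fila) := by
  -- the max value M and its first index j (A's quantities)
  obtain ⟨M, hM⟩ : ∃ M, PySem.List.max? valores (fun x => x) = some M := by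
    cases h : PySem.List.max? valores (fun x => x) with
    | none => exact absurd ((PySem.List.max?_eq_none_iff valores _).mp h) hne
    | some m => exact ⟨m, rfl⟩
  have hMmem : M ∈ valores := PySem.List.max?_mem hM
  have hMmax : ∀ y ∈ valores, y ≤ M := PySem.List.max?_isMax hM
  obtain ⟨j, hj⟩ : ∃ j, PySem.List.index? valores M = some j :=
    Option.isSome_iff_exists.mp ((PySem.List.index?_isSome_iff valores M).mpr hMmem)
  obtain ⟨hjlt, hjval, hjfirst⟩ := PySem.List.getElem_of_index?_eq_some hj
  -- B's sorted pair list
  set xs := (PySem.List.enumerate valores 0).map (fun q => (-q.2, q.1)) with hxs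
  rw [pvSorted2_eq]
  set pares := PySem.List.sorted xs (fun q => toLex q) with hpares
  have hperm : pares.Perm xs := PySem.List.sorted_perm xs _ false
  have hparesne : pares ≠ [] := by
    intro h
    have : xs = [] := by simpa [h] using hperm.symm.length_eq
    rcases valores with _ | ⟨v0, rest⟩
    · exact hne rfl
    · simp [hxs, PySem.List.enumerate_cons] at this
  obtain ⟨h, t, hcons⟩ := List.exists_cons_of_ne_nil hparesne
  -- the head of pares is (-M, j)
  have hhead : h = (-M, (j : Int)) := by
    have hhmem : h ∈ xs := hperm.mem_iff.mp (by simp [hcons])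
    rcases (pvMemPairs valores h).mp hhmem with ⟨k, hk, hkval⟩
    have hle : (toLex h : Lex (Int × Int)) ≤ toLex (-M, (j : Int)) :=
      PySem.List.key_head_sorted_le xs (fun q => toLex q) hcons _
        ((pvMemPairs valores _).mpr ⟨j, hjlt, by rw [hjval]⟩)
    rw [Prod.Lex.le_iff] at hle
    have hkM : valores[k] ≤ M := hMmax _ (by simp)
    rcases hle with hlt | ⟨heq, hle2⟩
    · exfalso; rw [hkval] at hlt; simp at hlt; omega
    · rw [hkval] at heq hle2
      simp at heq hle2
      have hkval' : valores[k] = M := by omega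
      have : ¬ k < j := fun hkj => hjfirst k hkj hkval'
      have hkj : k = j := by omega
      subst hkj
      rw [hkval]
      simp [hkval']
  -- the last of pares carries the minimum value
  have hlastmem : pares.getLast hparesne ∈ xs := hperm.mem_iff.mp (List.getLast_mem hparesne)
  rcases (pvMemPairs valores _).mp hlastmem with ⟨m, hm, hmval⟩
  have hmin : ∀ y ∈ valores, valores[m] ≤ y := by
    intro y hy
    rcases List.mem_iff_getElem.mp hy with ⟨k, hk, hky⟩
    have hmem : (-y, (k : Int)) ∈ pares :=
      hperm.symm.mem_iff.mp ((pvMemPairs valores _).mpr ⟨k, hk, by rw [hky]⟩)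
    have hle := pvGetLast_isMax xs (fun q => toLex q) hparesne (-y, (k : Int)) hmem
    have hle' : (toLex (-y, (k : Int)) : Lex (Int × Int)) ≤ toLex (pares.getLast hparesne) := hle
    rw [hmval, Prod.Lex.le_iff] at hle'
    simp at hle'
    omega
  -- the head and the last element of pares, as pyGetD values
  have hget0 : PySem.List.pyGetD pares 0 (0, 0) = (-M, (j : Int)) := by
    rw [hcons, PySem.List.pyGetD_zero_cons]; exact hhead
  have hgetlast : PySem.List.pyGetD pares (-1) (0, 0) = (-valores[m], (m : Int)) := by
    rw [PySem.List.pyGetD_neg_one pares (0, 0) hparesne]; exact hmval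
  -- the condition: first pair value ≠ last pair value  ↔  not all equal
  obtain ⟨v0, rest, hv⟩ := List.exists_cons_of_ne_nil hne
  have hAcond : (PySem.Set.len (PySem.Set.ofList valores) == 1) = rest.all (· == v0) := by
    rw [hv]; exact pvSetLen v0 rest
  have hcond : ((PySem.List.pyGetD pares 0 (0, 0)).1 != (PySem.List.pyGetD pares (-1) (0, 0)).1) =
      !(PySem.Set.len (PySem.Set.ofList valores) == 1) := by
    rw [hget0, hgetlast, hAcond]
    cases hall : rest.all (· == v0) with
    | true =>
      have hallM : valores[m] = M := by
        have h1 : valores[m] = v0 := by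
          have hmem : valores[m] ∈ v0 :: rest := by rw [← hv]; exact List.getElem_mem hm
          rcases List.mem_cons.mp hmem with h | h
          · exact h
          · simpa using (List.all_eq_true.mp hall) _ h
        have h2 : M = v0 := by
          have hmem : M ∈ v0 :: rest := by rw [← hv]; exact hMmem
          rcases List.mem_cons.mp hmem with h | h
          · exact h
          · simpa using (List.all_eq_true.mp hall) _ h
        rw [h1, h2]
      simp [hallM]
    | false =>
      have hne' : valores[m] ≠ M := by
        intro hMm
        have hall' : rest.all (· == v0) = true := by
          apply pvAllEq v0 rest M
          intro y hy
          have h1 := hmin y (hv ▸ hy)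
          have h2 := hMmax y (hv ▸ hy)
          omega
        rw [hall'] at hall; exact absurd hall (by simp)
      simp
      omega
  simp only [hM, Option.getD_some, hj]
  rw [hcond]
  cases hc : (PySem.Set.len (PySem.Set.ofList valores) == 1) with
  | true => simp
  | false =>
    simp only [Bool.not_false, if_true, Bool.false_eq_true, if_false]
    rw [hget0]
    rw [show ((-M, (j : Int)).2) = ((j : Nat) : Int) from rfl, PySem.List.pySetD_natCast]

-- ===== VERDICT (by name: the statement is the Claim_ definition above) =====
theorem convertir_a_politica_spec : Claim_equal_convertir_a_politica := by
  intro Q_table _ hPre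
  unfold Spec_convertir_a_politica convertir_a_politica convertir_a_politica_alt
  congr 1
  apply PySem.List.foldl_congr_mem
  intro politica p hp
  have hv := (hPre.2 p hp).2
  simp only []
  exact pvRow p.1 ((PySem.Dict.get? (PySem.Dict.mk p.2) "values").getD []) hv politica
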